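-- pv_equiv track=rewrite | github.com/MrBrantCode/unitest_baseline | mut_generate/mist_train_cf/cf_58838/solution.py | crypticCiphers
-- ===== SOURCE A (Python) =====
-- MOD = 10**9+7
--
-- def crypticCiphers(n, minValue, group, value):
--     dp = [[0 for _ in range(101)] for _ in range(101)]
--     dp[0][0] = 1
--     ciphers = sorted(zip(group, value))
--
--     for g, v in ciphers:
--         for i in range(n, g-1, -1):
--             for j in range(minValue, -1, -1):
--                 nextValue = min(100, j + v)
--                 dp[i][nextValue] = (dp[i][nextValue] + dp[i - g][j]) % MOD
--
--     return sum(dp[n]) % MOD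
-- ===== SOURCE B (Python) =====
-- MOD = 10**9+7
--
-- def crypticCiphers(n, minValue, group, value):
--     # Backward suffix DP: f[m][val] = number of ways to extend a partial pick of m members
--     # and capped value val, using the remaining (later) ciphers, to exactly n members.
--     f = [[1 if m == n else 0 for _ in range(101)] for m in range(101)]
--     for g, v in reversed(sorted(zip(group, value))):
--         f = [[(f[m][val] + (f[m + g][min(100, val + v)] if val <= minValue and m + g <= n else 0)) % MOD
--               for val in range(101)]
--              for m in range(101)]
--     return f[0][0] % MOD
-- ===== Notes on version B (the rewrite author's own statement) =====
-- stated objective: alternative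
-- what changed: Replaces A's forward in-place reachability knapsack (counting ways to reach each (members,value) state, then summing row n) by a backward suffix DP that counts completions: starting from the base table 1-at-members==n it processes the sorted ciphers in reverse, building for each suffix the number of ways to finish from a state, and returns the single entry f[0][0] (same asymptotics, larger constant).
-- outside the precondition, e.g. on crypticCiphers(-101, 0, [], []): A returns 1, B returns 0; on crypticCiphers(0, 39, [0, 0, 0], [-3, 6, -63]): A returns 30, B returns 7; on crypticCiphers(35, 50, [-13, -39, -50, -13, -39], [45, 10, 15, 5, 89]): A returns 1, B returns 0
import Mathlib
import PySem

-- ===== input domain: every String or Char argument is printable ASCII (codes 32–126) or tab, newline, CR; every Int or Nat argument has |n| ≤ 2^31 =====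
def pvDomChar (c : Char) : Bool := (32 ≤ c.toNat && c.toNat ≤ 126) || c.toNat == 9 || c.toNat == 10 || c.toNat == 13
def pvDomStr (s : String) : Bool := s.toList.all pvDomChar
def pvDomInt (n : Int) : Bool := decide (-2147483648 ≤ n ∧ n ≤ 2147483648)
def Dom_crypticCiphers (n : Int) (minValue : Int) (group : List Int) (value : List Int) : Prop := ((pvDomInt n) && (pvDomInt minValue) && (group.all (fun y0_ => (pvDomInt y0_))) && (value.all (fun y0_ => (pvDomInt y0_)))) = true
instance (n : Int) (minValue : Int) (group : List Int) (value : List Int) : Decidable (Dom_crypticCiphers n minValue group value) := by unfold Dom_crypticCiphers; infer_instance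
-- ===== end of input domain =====

-- B replaces A's forward in-place reachability knapsack (count ways to reach each state, sum row n)
-- by a backward suffix DP counting completions from each state, reading the single entry f[0][0]
-- (an alternative: same asymptotics, larger constant — it rebuilds the full table per item).

def MODC : Int := 1000000007

-- ===== PORT A =====
def crypticCiphers (n : Int) (minValue : Int) (group : List Int) (value : List Int) : Int :=
  let dp : List (List Int) :=
    (PySem.List.pyRange 0 101 1).map (fun _ => (PySem.List.pyRange 0 101 1).map (fun _ => (0 : Int)))
  let dp := PySem.List.pySetD dp 0 (PySem.List.pySetD (PySem.List.pyGetD dp 0 []) 0 1)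
  let ciphers := PySem.List.sorted2 (group.zip value) (fun p => p.1) (fun p => p.2)
  let dp := ciphers.foldl (fun dp gv =>
    (PySem.List.pyRange n (gv.1 - 1) (-1)).foldl (fun dp i =>
      (PySem.List.pyRange minValue (-1) (-1)).foldl (fun dp j =>
        let nextValue := min 100 (j + gv.2)
        PySem.List.pySetD dp i (PySem.List.pySetD (PySem.List.pyGetD dp i []) nextValue
          (PySem.Int.mod (PySem.List.pyGetD (PySem.List.pyGetD dp i []) nextValue 0
            + PySem.List.pyGetD (PySem.List.pyGetD dp (i - gv.1) []) j 0) MODC))) dp) dp) dp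
  PySem.Int.mod (PySem.List.pyGetD dp n []).sum MODC

-- ===== PORT B =====
-- the base table [[1 if m == n else 0 for _ in range(101)] for m in range(101)]
def pvBase (n : Int) : List (List Int) :=
  (PySem.List.pyRange 0 101 1).map (fun m =>
    (PySem.List.pyRange 0 101 1).map (fun _ => if m = n then (1 : Int) else 0))

-- one item of the backward pass: the comprehension rebuilding f from the previous suffix table.
-- Indices m, val, m+g, min(100,val+v) are plain non-negative in-range reads under Pre_, so
-- pyGetD with default is exact there.
def pvBStep (n : Int) (minValue : Int) (f : List (List Int)) (gv : Int × Int) : List (List Int) :=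
  (PySem.List.pyRange 0 101 1).map (fun m =>
    (PySem.List.pyRange 0 101 1).map (fun val =>
      PySem.Int.mod (PySem.List.pyGetD (PySem.List.pyGetD f m []) val 0 +
        (if val ≤ minValue ∧ m + gv.1 ≤ n then
          PySem.List.pyGetD (PySem.List.pyGetD f (m + gv.1) []) (min 100 (val + gv.2)) 0
         else 0)) MODC))

def crypticCiphers_alt (n : Int) (minValue : Int) (group : List Int) (value : List Int) : Int :=
  let f := pvBase n
  let f := (PySem.List.sorted2 (group.zip value) (fun p => p.1) (fun p => p.2)).reverse.foldl
    (pvBStep n minValue) f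
  PySem.Int.mod (PySem.List.pyGetD (PySem.List.pyGetD f 0 []) 0 0) MODC

-- ===== PRECONDITION & SPEC =====
-- Pre_ restricts to the problem's natural domain plus the inert corners both programs share:
-- outside it A either raises IndexError (n < -101 or n > 100; minValue > 100 with a usable
-- group size; out-of-range negative sizes) or returns accidental values through Python
-- negative-index wraparound (n = -101, or negative group sizes/values reached by the loops).
def Pre_crypticCiphers (n : Int) (minValue : Int) (group : List Int) (value : List Int) : Prop :=
  (∀ g ∈ group, 0 ≤ g) ∧ -100 ≤ n ∧ n ≤ 100 ∧
  (n < 0 ∨ (minValue ≤ 100 ∧ ∀ v ∈ value, 0 ≤ v) ∨ (∀ g ∈ group, n < g))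
instance (n : Int) (minValue : Int) (group : List Int) (value : List Int) : Decidable (Pre_crypticCiphers n minValue group value) := by unfold Pre_crypticCiphers; infer_instance
def pvWitness_crypticCiphers : Int × Int × List Int × List Int := (2, 50, [1, 2, 1], [30, 10, 60])
def Spec_crypticCiphers (n : Int) (minValue : Int) (group : List Int) (value : List Int) (out : Int) : Prop := out = crypticCiphers_alt n minValue group value
instance (n : Int) (minValue : Int) (group : List Int) (value : List Int) (out : Int) : Decidable (Spec_crypticCiphers n minValue group value out) := by unfold Spec_crypticCiphers; infer_instance

-- ===== CLAIM (what is proved, stated in full; the proofs are below) =====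
def Claim_equal_crypticCiphers : Prop := ∀ (n : Int) (minValue : Int) (group : List Int) (value : List Int), Dom_crypticCiphers n minValue group value → Pre_crypticCiphers n minValue group value → Spec_crypticCiphers n minValue group value (crypticCiphers n minValue group value)

-- ===== LEMMAS AND PROOFS =====

-- the common index list [0, 1, ..., 100]
def pvIdx : List Int := PySem.List.pyRange 0 101 1

-- grid cell read, exactly as the ports' nested pyGetD reads it
def pvG2 (G : List (List Int)) (i t : Int) : Int :=
  PySem.List.pyGetD (PySem.List.pyGetD G i []) t 0

-- A's innermost loop body (j-loop), with the item (g, v) and the row index i fixed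
def pvInner (v g i : Int) (dp : List (List Int)) (j : Int) : List (List Int) :=
  PySem.List.pySetD dp i (PySem.List.pySetD (PySem.List.pyGetD dp i []) (min 100 (j + v))
    (PySem.Int.mod (PySem.List.pyGetD (PySem.List.pyGetD dp i []) (min 100 (j + v)) 0
      + PySem.List.pyGetD (PySem.List.pyGetD dp (i - g) []) j 0) MODC))

-- A's whole per-item update (both index loops)
def pvStepA (n minValue : Int) (dp : List (List Int)) (gv : Int × Int) : List (List Int) :=
  (PySem.List.pyRange n (gv.1 - 1) (-1)).foldl (fun dp i =>
    (PySem.List.pyRange minValue (-1) (-1)).foldl (pvInner gv.2 gv.1 i) dp) dp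

-- A's initial table
def pvInitA : List (List Int) :=
  PySem.List.pySetD
    ((PySem.List.pyRange 0 101 1).map (fun _ => (PySem.List.pyRange 0 101 1).map (fun _ => (0:Int))))
    0
    (PySem.List.pySetD
      (PySem.List.pyGetD
        ((PySem.List.pyRange 0 101 1).map (fun _ => (PySem.List.pyRange 0 101 1).map (fun _ => (0:Int)))) 0 [])
      0 1)

-- B's suffix table for the item list S (the foldr the reversed foldl computes)
def pvT (n minValue : Int) (S : List (Int × Int)) : List (List Int) :=
  S.foldr (fun gv acc => pvBStep n minValue acc gv) (pvBase n)

-- sum of the sources A adds into column t of row i while scanning j = m, m-1, …, 0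
def pvSrcSum (src : Int → Int) (v m t : Int) : Int :=
  (((PySem.List.pyRange m (-1) (-1)).filter (fun j => min 100 (j + v) == t)).map src).sum

-- does any j in m, m-1, …, 0 write into column t?
def pvHit (v m t : Int) : Bool :=
  (PySem.List.pyRange m (-1) (-1)).any (fun j => min 100 (j + v) == t)

lemma pyGetD_pySetD_eq {α : Type} (xs : List α) (i : Int) (v : α) (d : α)
    (h0 : 0 ≤ i) (h1 : i < xs.length) :
    PySem.List.pyGetD (PySem.List.pySetD xs i v) i d = v := by
  rw [PySem.List.pySetD_of_nonneg xs v h0, PySem.List.pyGetD_of_nonneg _ d h0]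
  rw [List.getD_eq_getElem?_getD, List.getElem?_set_self ?h]
  · simp
  · simpa using (by omega : i.toNat < xs.length)

lemma pyGetD_pySetD_ne {α : Type} (xs : List α) (i i' : Int) (v : α) (d : α)
    (h0 : 0 ≤ i) (h0' : 0 ≤ i') (hne : i' ≠ i) :
    PySem.List.pyGetD (PySem.List.pySetD xs i v) i' d = PySem.List.pyGetD xs i' d := by
  rw [PySem.List.pySetD_of_nonneg xs v h0, PySem.List.pyGetD_of_nonneg _ d h0',
      PySem.List.pyGetD_of_nonneg _ d h0']
  rw [List.getD_eq_getElem?_getD, List.getD_eq_getElem?_getD, List.getElem?_set_ne]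
  omega

lemma pvMod_absorb (a b : Int) :
    PySem.Int.mod (PySem.Int.mod a MODC + b) MODC = PySem.Int.mod (a + b) MODC := by
  rw [PySem.Int.mod_eq_emod_of_pos (by decide), PySem.Int.mod_eq_emod_of_pos (by decide),
      PySem.Int.mod_eq_emod_of_pos (by decide), Int.emod_add_emod]

lemma pvMod_self (a : Int) (h0 : 0 ≤ a) (h1 : a < MODC) : PySem.Int.mod a MODC = a := by
  rw [PySem.Int.mod_eq_emod_of_pos (by decide)]
  exact Int.emod_eq_of_lt h0 h1

-- x % M ≡ x
lemma pvModEq_mod (a : Int) : Int.ModEq MODC (PySem.Int.mod a MODC) a := by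
  rw [PySem.Int.mod_eq_emod_of_pos (by decide)]
  exact Int.emod_emod_of_dvd a dvd_rfl

lemma pvModEq_result (a b : Int) (h : Int.ModEq MODC a b) :
    PySem.Int.mod a MODC = PySem.Int.mod b MODC := by
  rw [PySem.Int.mod_eq_emod_of_pos (by decide), PySem.Int.mod_eq_emod_of_pos (by decide)]
  exact h

lemma pvSum_modEq (L : List Int) (f g : Int → Int)
    (h : ∀ x ∈ L, Int.ModEq MODC (f x) (g x)) :
    Int.ModEq MODC ((L.map f).sum) ((L.map g).sum) := by
  induction L with
  | nil => rfl
  | cons a t ih =>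
    simp only [List.map_cons, List.sum_cons]
    exact Int.ModEq.add (h a List.mem_cons_self) (ih (fun x hx => h x (List.mem_cons_of_mem _ hx)))

lemma pvSum_zeros (L : List Int) : (L.map (fun _ => (0:Int))).sum = 0 := by
  simp

-- sum of a one-point indicator over a nodup list
lemma pvSum_pick (L : List Int) (hL : L.Nodup) (x : Int) (hx : x ∈ L) (c : Int → Int) :
    (L.map (fun t => if t = x then c t else 0)).sum = c x := by
  induction L with
  | nil => simp at hx
  | cons a t ih =>
    rcases List.nodup_cons.mp hL with ⟨hna, hnt⟩
    by_cases hax : a = x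
    · subst hax
      simp only [List.map_cons, List.sum_cons]
      have hz : t.map (fun u => if u = a then c u else 0) = t.map (fun _ => (0:Int)) := by
        apply List.map_congr_left
        intro u hu
        have : u ≠ a := fun e => hna (e ▸ hu)
        simp [this]
      rw [hz, pvSum_zeros]; simp
    · have hmt : x ∈ t := by
        rcases List.mem_cons.mp hx with h | h
        · exact absurd h.symm hax
        · exact h
      simp only [List.map_cons, List.sum_cons, if_neg hax]
      rw [ih hnt hmt]; ring

lemma pvIdx_nodup : pvIdx.Nodup := PySem.List.nodup_pyRange_one _ _

lemma pvIdx_mem (x : Int) (h0 : 0 ≤ x) (h1 : x ≤ 100) : x ∈ pvIdx :=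
  PySem.List.mem_pyRange_one.mpr ⟨h0, by omega⟩

lemma pvIdx_bounds (x : Int) (h : x ∈ pvIdx) : 0 ≤ x ∧ x ≤ 100 := by
  obtain ⟨h0, h1⟩ := PySem.List.mem_pyRange_one.mp h
  exact ⟨h0, by omega⟩

lemma pvSum_add (L : List Int) (f g : Int → Int) :
    (L.map (fun x => f x + g x)).sum = (L.map f).sum + (L.map g).sum := by
  induction L with
  | nil => simp
  | cons a t ih => simp only [List.map_cons, List.sum_cons]; rw [ih]; ring

-- fibering a sum over keys: summing the fibers over all key values recovers the plain sum
lemma pvFiber (T : List Int) (hT : T.Nodup) (key : Int → Int) (F : Int → Int) :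
    ∀ (J : List Int), (∀ j ∈ J, key j ∈ T) →
    (T.map (fun t => ((J.filter (fun j => key j == t)).map F).sum)).sum = (J.map F).sum := by
  intro J
  induction J with
  | nil =>
    intro _
    simp
  | cons j J' ih =>
    intro hk
    have hrec := ih (fun x hx => hk x (List.mem_cons_of_mem _ hx))
    have hsplit : T.map (fun t => (((j :: J').filter (fun u => key u == t)).map F).sum)
        = T.map (fun t => (if t = key j then F j else 0) +
            ((J'.filter (fun u => key u == t)).map F).sum) := by
      apply List.map_congr_left
      intro t _
      rw [List.filter_cons]
      by_cases he : key j = t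
      · rw [if_pos (by simpa using he), if_pos he.symm, List.map_cons, List.sum_cons]
      · rw [if_neg (by simpa using he), if_neg (fun e => he e.symm), zero_add]
    rw [hsplit]
    have hadd := pvSum_add T (fun t => if t = key j then F j else 0)
      (fun t => ((J'.filter (fun u => key u == t)).map F).sum)
    rw [hadd, pvSum_pick T hT (key j) (hk j List.mem_cons_self) (fun _ => F j), hrec]
    simp

lemma pvSum_mul_right (L : List Int) (f : Int → Int) (c : Int) :
    ((L.map f).sum) * c = (L.map (fun x => f x * c)).sum := by
  induction L with
  | nil => simp
  | cons a t ih => simp only [List.map_cons, List.sum_cons]; rw [← ih]; ring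

-- a countdown-range sum as an indicator sum over pvIdx
lemma pvInnerRange (mv : Int) (hmv : mv ≤ 100) (h : Int → Int) :
    ((PySem.List.pyRange mv (-1) (-1)).map h).sum =
      (pvIdx.map (fun t => if t ≤ mv then h t else 0)).sum := by
  by_cases hneg : mv < 0
  · rw [PySem.List.pyRange_neg_one_eq_nil (by omega)]
    have : pvIdx.map (fun t => if t ≤ mv then h t else 0) = pvIdx.map (fun _ => (0:Int)) := by
      apply List.map_congr_left
      intro t ht
      obtain ⟨h0, _⟩ := pvIdx_bounds t ht
      rw [if_neg (by omega)]
    rw [this, pvSum_zeros]; rfl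
  · have hsplit : PySem.List.pyRange 0 101 1 =
        PySem.List.pyRange 0 (mv + 1) 1 ++ PySem.List.pyRange (mv + 1) 101 1 :=
      PySem.List.pyRange_one_append 0 (mv + 1) 101 (by omega) (by omega)
    rw [PySem.List.pyRange_neg_one_eq_reverse, List.map_reverse, List.sum_reverse]
    show ((PySem.List.pyRange 0 (mv+1) 1).map h).sum = _
    rw [pvIdx, hsplit, List.map_append, List.sum_append]
    have h1 : (PySem.List.pyRange 0 (mv+1) 1).map (fun t => if t ≤ mv then h t else 0)
        = (PySem.List.pyRange 0 (mv+1) 1).map h := by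
      apply List.map_congr_left
      intro t ht
      obtain ⟨_, h2⟩ := PySem.List.mem_pyRange_one.mp ht
      rw [if_pos (by omega)]
    have h2 : (PySem.List.pyRange (mv+1) 101 1).map (fun t => if t ≤ mv then h t else 0)
        = (PySem.List.pyRange (mv+1) 101 1).map (fun _ => (0:Int)) := by
      apply List.map_congr_left
      intro t ht
      obtain ⟨h3, _⟩ := PySem.List.mem_pyRange_one.mp ht
      rw [if_neg (by omega)]
    rw [h1, h2, pvSum_zeros, add_zero]

-- index shift m ↦ m + g inside a [0..100] sum with matching guards
lemma pvShift (g n : Int) (hg : 0 ≤ g) (hn0 : 0 ≤ n) (hn : n ≤ 100) (Φ : Int → Int) :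
    (pvIdx.map (fun m => if g ≤ m ∧ m ≤ n then Φ m else 0)).sum
      = (pvIdx.map (fun m => if m + g ≤ n then Φ (m + g) else 0)).sum := by
  by_cases hgn : n < g
  · have hL : pvIdx.map (fun m => if g ≤ m ∧ m ≤ n then Φ m else 0) = pvIdx.map (fun _ => (0:Int)) := by
      apply List.map_congr_left
      intro m _
      rw [if_neg (by omega)]
    have hR : pvIdx.map (fun m => if m + g ≤ n then Φ (m + g) else 0) = pvIdx.map (fun _ => (0:Int)) := by
      apply List.map_congr_left
      intro m hm
      obtain ⟨h0, _⟩ := pvIdx_bounds m hm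
      rw [if_neg (by omega)]
    rw [hL, hR]
  · -- g ≤ n
    have hsplitL : PySem.List.pyRange 0 101 1 =
        (PySem.List.pyRange 0 g 1 ++ PySem.List.pyRange g (n+1) 1) ++ PySem.List.pyRange (n+1) 101 1 := by
      rw [← PySem.List.pyRange_one_append 0 g (n+1) (by omega) (by omega)]
      exact PySem.List.pyRange_one_append 0 (n+1) 101 (by omega) (by omega)
    have hsplitR : PySem.List.pyRange 0 101 1 =
        PySem.List.pyRange 0 (n - g + 1) 1 ++ PySem.List.pyRange (n - g + 1) 101 1 :=
      PySem.List.pyRange_one_append 0 (n - g + 1) 101 (by omega) (by omega)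
    have congr0 : ∀ (L : List Int) (f : Int → Int), (∀ x ∈ L, f x = 0) → (L.map f).sum = 0 := by
      intro L f hf
      rw [List.map_congr_left hf, pvSum_zeros]
    conv_lhs => rw [pvIdx, hsplitL]
    conv_rhs => rw [pvIdx, hsplitR]
    simp only [List.map_append, List.sum_append]
    have hz1 : ((PySem.List.pyRange 0 g 1).map (fun m => if g ≤ m ∧ m ≤ n then Φ m else 0)).sum = 0 :=
      congr0 _ _ (fun x hx => by
        obtain ⟨_, h2⟩ := PySem.List.mem_pyRange_one.mp hx
        rw [if_neg (by omega)])
    have hz3 : ((PySem.List.pyRange (n+1) 101 1).map (fun m => if g ≤ m ∧ m ≤ n then Φ m else 0)).sum = 0 :=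
      congr0 _ _ (fun x hx => by
        obtain ⟨h1, _⟩ := PySem.List.mem_pyRange_one.mp hx
        rw [if_neg (by omega)])
    have hzR : ((PySem.List.pyRange (n-g+1) 101 1).map (fun m => if m + g ≤ n then Φ (m + g) else 0)).sum = 0 :=
      congr0 _ _ (fun x hx => by
        obtain ⟨h1, _⟩ := PySem.List.mem_pyRange_one.mp hx
        rw [if_neg (by omega)])
    rw [hz1, hz3, hzR]
    have hmidL : (PySem.List.pyRange g (n+1) 1).map (fun m => if g ≤ m ∧ m ≤ n then Φ m else 0)
        = (PySem.List.pyRange g (n+1) 1).map Φ := by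
      apply List.map_congr_left
      intro m hm
      obtain ⟨h1, h2⟩ := PySem.List.mem_pyRange_one.mp hm
      rw [if_pos ⟨h1, by omega⟩]
    have hmidR : (PySem.List.pyRange 0 (n-g+1) 1).map (fun m => if m + g ≤ n then Φ (m + g) else 0)
        = (PySem.List.pyRange 0 (n-g+1) 1).map (fun m => Φ (m + g)) := by
      apply List.map_congr_left
      intro m hm
      obtain ⟨h1, h2⟩ := PySem.List.mem_pyRange_one.mp hm
      rw [if_pos (by omega)]
    rw [hmidL, hmidR]
    have : (PySem.List.pyRange 0 (n-g+1) 1).map (fun m => Φ (m + g))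
        = (PySem.List.pyRange g (n+1) 1).map Φ := by
      rw [PySem.List.pyRange_one 0 (n-g+1), PySem.List.pyRange_one g (n+1)]
      rw [List.map_map, List.map_map]
      have hlen : (n - g + 1 - 0).toNat = (n + 1 - g).toNat := by omega
      rw [hlen]
      apply List.map_congr_left
      intro k _
      simp only [Function.comp]
      congr 1
      omega
    rw [this]; ring

-- reads of B's tables
lemma pvBase_g2 (n m t : Int) (hm0 : 0 ≤ m) (hm1 : m ≤ 100) (ht0 : 0 ≤ t) (ht1 : t ≤ 100) :
    pvG2 (pvBase n) m t = if m = n then 1 else 0 := by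
  rw [pvG2, pvBase, PySem.List.pyGetD_map_pyRange_of_nonneg _ _ _ _ hm0 (by omega),
      PySem.List.pyGetD_map_pyRange_of_nonneg _ _ _ _ ht0 (by omega)]

lemma pvBStep_g2 (n minValue : Int) (f : List (List Int)) (gv : Int × Int) (m t : Int)
    (hm0 : 0 ≤ m) (hm1 : m ≤ 100) (ht0 : 0 ≤ t) (ht1 : t ≤ 100) :
    pvG2 (pvBStep n minValue f gv) m t =
      PySem.Int.mod (pvG2 f m t +
        (if t ≤ minValue ∧ m + gv.1 ≤ n then pvG2 f (m + gv.1) (min 100 (t + gv.2)) else 0)) MODC := by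
  rw [pvG2, pvBStep, PySem.List.pyGetD_map_pyRange_of_nonneg _ _ _ _ hm0 (by omega),
      PySem.List.pyGetD_map_pyRange_of_nonneg _ _ _ _ ht0 (by omega)]
  rfl

-- when no item can ever be taken, B's suffix tables stay the 0/1 base table
lemma pvBConst (n minValue : Int) :
    ∀ (S : List (Int × Int)), (∀ gv ∈ S, ∀ m : Int, 0 ≤ m → ¬(m + gv.1 ≤ n)) →
    ∀ m t : Int, 0 ≤ m → m ≤ 100 → 0 ≤ t → t ≤ 100 →
    pvG2 (pvT n minValue S) m t = if m = n then 1 else 0 := by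
  intro S
  induction S with
  | nil =>
    intro _ m t hm0 hm1 ht0 ht1
    exact pvBase_g2 n m t hm0 hm1 ht0 ht1
  | cons gv S' ih =>
    intro hno m t hm0 hm1 ht0 ht1
    have hrec := ih (fun q hq => hno q (List.mem_cons_of_mem _ hq))
    show pvG2 (pvBStep n minValue (pvT n minValue S') gv) m t = _
    rw [pvBStep_g2 n minValue _ gv m t hm0 hm1 ht0 ht1,
        if_neg (fun h => hno gv List.mem_cons_self m hm0 h.2), add_zero,
        hrec m t hm0 hm1 ht0 ht1]
    by_cases he : m = n
    · simp only [if_pos he]; exact pvMod_self 1 (by decide) (by decide)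
    · simp only [if_neg he]; exact pvMod_self 0 (by decide) (by decide)

theorem pvInner_char (v g i : Int) (hv : 0 ≤ v) (hi0 : 0 ≤ i) (hi1 : i ≤ 100)
    (hig : 0 ≤ i - g) (src : Int → Int) :
    ∀ (k : Nat) (m : Int) (G : List (List Int)), (m + 1).toNat = k → m ≤ 100 →
    G.length = 101 → (∀ r ∈ G, r.length = 101) →
    (∀ j, 0 ≤ j → j ≤ m → pvG2 G (i - g) j = src j) →
    ((((PySem.List.pyRange m (-1) (-1)).foldl (pvInner v g i) G)).length = 101 ∧
     (∀ r ∈ (PySem.List.pyRange m (-1) (-1)).foldl (pvInner v g i) G, r.length = 101) ∧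
     (∀ i', 0 ≤ i' → i' ≠ i →
        PySem.List.pyGetD ((PySem.List.pyRange m (-1) (-1)).foldl (pvInner v g i) G) i' ([]:List Int)
          = PySem.List.pyGetD G i' []) ∧
     (∀ t, 0 ≤ t →
        pvG2 ((PySem.List.pyRange m (-1) (-1)).foldl (pvInner v g i) G) i t =
          if pvHit v m t then PySem.Int.mod (pvG2 G i t + pvSrcSum src v m t) MODC
          else pvG2 G i t)) := by
  intro k
  induction k with
  | zero =>
    intro m G hk hm hlen hrows _hread
    have hnil : PySem.List.pyRange m (-1) (-1) = [] :=
      PySem.List.pyRange_neg_one_eq_nil (by omega)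
    rw [hnil]
    refine ⟨hlen, hrows, fun _ _ _ => rfl, fun t _ => ?_⟩
    simp [pvHit, hnil]
  | succ k ih =>
    intro m G hk hm hlen hrows hread
    have hm0 : 0 ≤ m := by omega
    have hcons : PySem.List.pyRange m (-1) (-1) = m :: PySem.List.pyRange (m - 1) (-1) (-1) :=
      PySem.List.pyRange_neg_one_cons (by omega)
    set c : Int := min 100 (m + v) with hc
    have hcb : 0 ≤ c ∧ c ≤ 100 ∧ m ≤ c := by
      rw [hc, min_def]; split_ifs <;> omega
    set R : List Int := PySem.List.pyGetD G i [] with hR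
    have hRmem : R ∈ G := by
      rw [hR, PySem.List.pyGetD_eq_getElem G [] hi0 (by rw [hlen]; exact_mod_cast (by omega : i < (101:Int)))]
      exact List.getElem_mem _
    have hRlen : R.length = 101 := hrows R hRmem
    set w : Int := PySem.Int.mod (pvG2 G i c + pvG2 G (i - g) m) MODC with hw
    have hG1 : pvInner v g i G m = PySem.List.pySetD G i (PySem.List.pySetD R c w) := by
      rfl
    set G1 : List (List Int) := PySem.List.pySetD G i (PySem.List.pySetD R c w) with hG1d
    have hlen1 : G1.length = 101 := by rw [hG1d, PySem.List.length_pySetD, hlen]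
    have hrows1 : ∀ r ∈ G1, r.length = 101 := by
      intro r hr
      rw [hG1d, PySem.List.pySetD_of_nonneg _ _ hi0] at hr
      rcases List.mem_or_eq_of_mem_set hr with h | rfl
      · exact hrows r h
      · rw [PySem.List.length_pySetD]; exact hRlen
    have hrowNe : ∀ i', 0 ≤ i' → i' ≠ i →
        PySem.List.pyGetD G1 i' ([]:List Int) = PySem.List.pyGetD G i' [] := by
      intro i' h0 hne
      rw [hG1d]; exact pyGetD_pySetD_ne G i i' _ _ hi0 h0 hne
    have hrowI : PySem.List.pyGetD G1 i ([]:List Int) = PySem.List.pySetD R c w := by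
      rw [hG1d]
      exact pyGetD_pySetD_eq G i _ _ hi0 (by rw [hlen]; exact_mod_cast (by omega : i < (101:Int)))
    have hg2G1 : ∀ t, 0 ≤ t → pvG2 G1 i t = if t = c then w else pvG2 G i t := by
      intro t ht
      rw [pvG2, hrowI]
      by_cases he : t = c
      · rw [if_pos he, he]
        exact pyGetD_pySetD_eq R c w 0 hcb.1 (by rw [hRlen]; exact_mod_cast (by omega : c < (101:Int)))
      · rw [if_neg he, pvG2, ← hR]
        exact pyGetD_pySetD_ne R c t w 0 hcb.1 ht he
    have hreadTail : ∀ j, 0 ≤ j → j ≤ m - 1 → pvG2 G1 (i - g) j = src j := by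
      intro j h0 h1
      by_cases hgi : i - g = i
      · rw [hgi, hg2G1 j h0, if_neg (by omega)]
        rw [← hgi]
        exact hread j h0 (by omega)
      · rw [pvG2, hrowNe (i - g) hig hgi, ← pvG2]
        exact hread j h0 (by omega)
    have hsrcm : pvG2 G (i - g) m = src m := hread m hm0 le_rfl
    obtain ⟨L1, L2, L3, L4⟩ := ih (m - 1) G1 (by omega) (by omega) hlen1 hrows1 hreadTail
    rw [hcons, List.foldl_cons, hG1]
    refine ⟨L1, L2, ?_, ?_⟩
    · intro i' h0 hne
      rw [L3 i' h0 hne]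
      exact hrowNe i' h0 hne
    · intro t ht
      have hhit : pvHit v m t = ((c == t) || pvHit v (m - 1) t) := by
        rw [pvHit, hcons, List.any_cons, pvHit]
      have hsum : pvSrcSum src v m t =
          (if (c == t) then src m + pvSrcSum src v (m - 1) t else pvSrcSum src v (m - 1) t) := by
        rw [pvSrcSum, hcons, List.filter_cons]
        by_cases he : (c == t) = true
        · rw [if_pos he, if_pos he, List.map_cons, List.sum_cons, pvSrcSum]
        · rw [if_neg he, if_neg (by simpa using he), pvSrcSum]
      rw [L4 t ht, hhit, hsum]
      by_cases he : c = t
      · have heb : (c == t) = true := by simp [he]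
        rw [heb]
        simp only [Bool.true_or, if_true]
        have hgw : pvG2 G1 i t = w := by rw [hg2G1 t ht, if_pos he.symm]
        by_cases hht : pvHit v (m - 1) t = true
        · rw [if_pos hht, hgw, hw, hsrcm, pvMod_absorb, he]
          congr 1; ring
        · rw [if_neg hht, hgw, hw, hsrcm, he]
          have : pvSrcSum src v (m - 1) t = 0 := by
            rw [pvSrcSum]
            have : (PySem.List.pyRange (m - 1) (-1) (-1)).filter (fun j => min 100 (j + v) == t) = [] := by
              rw [List.filter_eq_nil_iff]
              intro a ha hpa
              rw [pvHit] at hht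
              exact hht (List.any_eq_true.mpr ⟨a, ha, hpa⟩)
            rw [this]; rfl
          rw [this, add_zero]
      · have heb : (c == t) = false := by simp [he]
        rw [heb]
        simp only [Bool.false_or, Bool.false_eq_true, if_false]
        have hgw : pvG2 G1 i t = pvG2 G i t := by rw [hg2G1 t ht, if_neg (fun e => he e.symm)]
        rw [hgw]

theorem pvOuter_char (v g n minValue : Int) (hv : 0 ≤ v) (hg : 0 ≤ g)
    (hn : n ≤ 100) (hmv : minValue ≤ 100) (G0 : List (List Int)) :
    ∀ (k : Nat) (a : Int) (G : List (List Int)), (a - (g - 1)).toNat = k → a ≤ n →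
    G.length = 101 → (∀ r ∈ G, r.length = 101) →
    (∀ i' t : Int, 0 ≤ i' → i' ≤ a → 0 ≤ t → pvG2 G i' t = pvG2 G0 i' t) →
    ((((PySem.List.pyRange a (g - 1) (-1)).foldl
        (fun dp i => (PySem.List.pyRange minValue (-1) (-1)).foldl (pvInner v g i) dp) G)).length = 101 ∧
     (∀ r ∈ (PySem.List.pyRange a (g - 1) (-1)).foldl
        (fun dp i => (PySem.List.pyRange minValue (-1) (-1)).foldl (pvInner v g i) dp) G, r.length = 101) ∧
     (∀ i' t : Int, 0 ≤ i' → 0 ≤ t →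
        pvG2 ((PySem.List.pyRange a (g - 1) (-1)).foldl
          (fun dp i => (PySem.List.pyRange minValue (-1) (-1)).foldl (pvInner v g i) dp) G) i' t =
        if g ≤ i' ∧ i' ≤ a then
          (if pvHit v minValue t then
            PySem.Int.mod (pvG2 G0 i' t + pvSrcSum (fun j => pvG2 G0 (i' - g) j) v minValue t) MODC
          else pvG2 G0 i' t)
        else pvG2 G i' t)) := by
  intro k
  induction k with
  | zero =>
    intro a G hk ha hlen hrows hagree
    have hnil : PySem.List.pyRange a (g - 1) (-1) = [] :=
      PySem.List.pyRange_neg_one_eq_nil (by omega)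
    rw [hnil]
    exact ⟨hlen, hrows, fun i' t h0 ht => by rw [List.foldl_nil, if_neg (by omega)]⟩
  | succ k ih =>
    intro a G hk ha hlen hrows hagree
    have hga : g ≤ a := by omega
    have ha0 : 0 ≤ a := by omega
    have hcons : PySem.List.pyRange a (g - 1) (-1) = a :: PySem.List.pyRange (a - 1) (g - 1) (-1) :=
      PySem.List.pyRange_neg_one_cons (by omega)
    have hreadA : ∀ j, 0 ≤ j → j ≤ minValue → pvG2 G (a - g) j = pvG2 G0 (a - g) j := by
      intro j h0 _h1
      exact hagree (a - g) j (by omega) (by omega) h0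
    obtain ⟨I1, I2, I3, I4⟩ := pvInner_char v g a hv ha0 (by omega) (by omega)
      (fun j => pvG2 G0 (a - g) j) (minValue + 1).toNat minValue G rfl hmv hlen hrows hreadA
    set G1 : List (List Int) := (PySem.List.pyRange minValue (-1) (-1)).foldl (pvInner v g a) G with hG1
    have hagree1 : ∀ i' t : Int, 0 ≤ i' → i' ≤ a - 1 → 0 ≤ t → pvG2 G1 i' t = pvG2 G0 i' t := by
      intro i' t h0 h1 ht
      rw [pvG2, I3 i' h0 (by omega), ← pvG2]
      exact hagree i' t h0 (by omega) ht
    obtain ⟨O1, O2, O3⟩ := ih (a - 1) G1 (by omega) (by omega) I1 I2 hagree1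
    rw [hcons, List.foldl_cons]
    refine ⟨O1, O2, ?_⟩
    intro i' t h0 ht
    rw [O3 i' t h0 ht]
    by_cases h1 : g ≤ i' ∧ i' ≤ a - 1
    · rw [if_pos h1, if_pos (show g ≤ i' ∧ i' ≤ a from ⟨h1.1, by omega⟩)]
    · rw [if_neg h1]
      by_cases h2 : i' = a
      · rw [if_pos (show g ≤ i' ∧ i' ≤ a by omega)]
        subst h2
        rw [I4 t ht]
        rw [hagree i' t h0 le_rfl ht]
      · rw [if_neg (show ¬(g ≤ i' ∧ i' ≤ a) by omega), pvG2, I3 i' h0 h2, ← pvG2]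

-- no hit means the source sum is empty
lemma pvSrcSum_zero_of_not_hit (src : Int → Int) (v m t : Int) (h : pvHit v m t = false) :
    pvSrcSum src v m t = 0 := by
  rw [pvSrcSum]
  have : (PySem.List.pyRange m (-1) (-1)).filter (fun j => min 100 (j + v) == t) = [] := by
    rw [List.filter_eq_nil_iff]
    intro a ha hpa
    rw [pvHit] at h
    have hT : (PySem.List.pyRange m (-1) (-1)).any (fun j => min 100 (j + v) == t) = true :=
      List.any_eq_true.mpr ⟨a, ha, hpa⟩
    rw [h] at hT
    exact Bool.false_ne_true hT
  rw [this]; rfl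

-- A's per-item update, pointwise, up to congruence mod M
lemma pvStepA_modEq (n minValue : Int) (g v : Int) (hg : 0 ≤ g) (hv : 0 ≤ v)
    (hn : n ≤ 100) (hmv : minValue ≤ 100) (G : List (List Int))
    (hlen : G.length = 101) (hrows : ∀ r ∈ G, r.length = 101) (m t : Int)
    (hm0 : 0 ≤ m) (ht0 : 0 ≤ t) :
    Int.ModEq MODC (pvG2 (pvStepA n minValue G (g, v)) m t)
      (pvG2 G m t + (if g ≤ m ∧ m ≤ n then
        pvSrcSum (fun j => pvG2 G (m - g) j) v minValue t else 0)) := by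
  obtain ⟨_, _, O3⟩ := pvOuter_char v g n minValue hv hg hn hmv G
    (n - (g - 1)).toNat n G rfl le_rfl hlen hrows (fun _ _ _ _ _ => rfl)
  rw [pvStepA]
  rw [O3 m t hm0 ht0]
  by_cases hc : g ≤ m ∧ m ≤ n
  · rw [if_pos hc, if_pos hc]
    by_cases hh : pvHit v minValue t = true
    · rw [if_pos hh]
      exact pvModEq_mod _
    · rw [if_neg hh, pvSrcSum_zero_of_not_hit _ _ _ _ (by simpa using hh), add_zero]
  · rw [if_neg hc, if_neg hc, add_zero]

-- shape preservation along A's item fold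
lemma pvFoldA_shape (n minValue : Int) (hn : n ≤ 100) (hmv : minValue ≤ 100) :
    ∀ (S : List (Int × Int)) (G : List (List Int)), (∀ gv ∈ S, 0 ≤ gv.1 ∧ 0 ≤ gv.2) →
    G.length = 101 → (∀ r ∈ G, r.length = 101) →
    (S.foldl (pvStepA n minValue) G).length = 101 ∧
      (∀ r ∈ S.foldl (pvStepA n minValue) G, r.length = 101) := by
  intro S
  induction S with
  | nil => intro G _ h1 h2; exact ⟨h1, h2⟩
  | cons gv S' ih =>
    intro G hmem h1 h2
    obtain ⟨hg, hvv⟩ := hmem gv List.mem_cons_self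
    obtain ⟨A1, A2, _⟩ := pvOuter_char gv.2 gv.1 n minValue hvv hg hn hmv G
      (n - (gv.1 - 1)).toNat n G rfl le_rfl h1 h2 (fun _ _ _ _ _ => rfl)
    exact ih _ (fun q hq => hmem q (List.mem_cons_of_mem _ hq)) A1 A2

-- the exchange identity: A's added mass against the suffix table equals
-- the current table against B's added mass (an exact integer identity)
lemma pvExchange (n minValue g v : Int) (hg : 0 ≤ g) (hv : 0 ≤ v)
    (hn0 : 0 ≤ n) (hn : n ≤ 100) (hmv : minValue ≤ 100) (G T2 : List (List Int)) :
    (pvIdx.map (fun m => (pvIdx.map (fun t =>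
        (if g ≤ m ∧ m ≤ n then pvSrcSum (fun j => pvG2 G (m - g) j) v minValue t else 0)
          * pvG2 T2 m t)).sum)).sum
    = (pvIdx.map (fun m => (pvIdx.map (fun t =>
        pvG2 G m t * (if t ≤ minValue ∧ m + g ≤ n then pvG2 T2 (m + g) (min 100 (t + v)) else 0))).sum)).sum := by
  -- Φ m: the inner single sum both sides reduce to
  set Φ : Int → Int := fun m =>
    (pvIdx.map (fun t => if t ≤ minValue then pvG2 G (m - g) t * pvG2 T2 m (min 100 (t + v)) else 0)).sum
    with hΦ
  have hL : (pvIdx.map (fun m => (pvIdx.map (fun t =>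
      (if g ≤ m ∧ m ≤ n then pvSrcSum (fun j => pvG2 G (m - g) j) v minValue t else 0)
        * pvG2 T2 m t)).sum)).sum
      = (pvIdx.map (fun m => if g ≤ m ∧ m ≤ n then Φ m else 0)).sum := by
    apply congrArg
    apply List.map_congr_left
    intro m _
    by_cases hc : g ≤ m ∧ m ≤ n
    · simp only [if_pos hc]
      -- inner sum: fiber + multiply-in
      have h1 : ∀ t ∈ pvIdx, pvSrcSum (fun j => pvG2 G (m - g) j) v minValue t * pvG2 T2 m t
          = (((PySem.List.pyRange minValue (-1) (-1)).filter (fun j => min 100 (j + v) == t)).map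
              (fun j => pvG2 G (m - g) j * pvG2 T2 m (min 100 (j + v)))).sum := by
        intro t _
        rw [pvSrcSum, pvSum_mul_right]
        apply congrArg
        apply List.map_congr_left
        intro j hj
        have := (List.mem_filter.mp hj).2
        have hjt : min 100 (j + v) = t := by simpa using this
        rw [hjt]
      rw [List.map_congr_left h1]
      rw [pvFiber pvIdx pvIdx_nodup (fun j => min 100 (j + v))
            (fun j => pvG2 G (m - g) j * pvG2 T2 m (min 100 (j + v)))
            (PySem.List.pyRange minValue (-1) (-1))
            (fun j hj => by
              obtain ⟨h1', h2'⟩ := PySem.List.mem_pyRange_neg_one.mp hj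
              exact pvIdx_mem _ (le_min (by omega) (by omega)) (min_le_left _ _))]
      rw [pvInnerRange minValue hmv]
    · simp only [if_neg hc]
      have : pvIdx.map (fun t => (0:Int) * pvG2 T2 m t) = pvIdx.map (fun _ => (0:Int)) := by
        apply List.map_congr_left; intro t _; ring
      rw [this, pvSum_zeros]
  have hR : (pvIdx.map (fun m => (pvIdx.map (fun t =>
      pvG2 G m t * (if t ≤ minValue ∧ m + g ≤ n then pvG2 T2 (m + g) (min 100 (t + v)) else 0))).sum)).sum
      = (pvIdx.map (fun m => if m + g ≤ n then Φ (m + g) else 0)).sum := by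
    apply congrArg
    apply List.map_congr_left
    intro m _
    by_cases hc : m + g ≤ n
    · rw [if_pos hc, hΦ]
      simp only
      apply congrArg
      apply List.map_congr_left
      intro t _
      have hmg : m + g - g = m := by omega
      rw [hmg]
      by_cases ht : t ≤ minValue
      · rw [if_pos ⟨ht, hc⟩, if_pos ht]
      · rw [if_neg (fun h => ht h.1), if_neg ht, mul_zero]
    · rw [if_neg hc]
      have : pvIdx.map (fun t => pvG2 G m t *
          (if t ≤ minValue ∧ m + g ≤ n then pvG2 T2 (m + g) (min 100 (t + v)) else 0))
          = pvIdx.map (fun _ => (0:Int)) := by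
        apply List.map_congr_left
        intro t _
        rw [if_neg (fun h => hc h.2), mul_zero]
      rw [this, pvSum_zeros]
  rw [hL, hR]
  exact pvShift g n hg hn0 hn Φ

-- the prefix/suffix convolution invariant
lemma pvConv (n minValue : Int) (hn0 : 0 ≤ n) (hn : n ≤ 100) (hmv : minValue ≤ 100) :
    ∀ (S : List (Int × Int)) (G : List (List Int)),
    (∀ gv ∈ S, 0 ≤ gv.1 ∧ 0 ≤ gv.2) →
    G.length = 101 → (∀ r ∈ G, r.length = 101) →
    Int.ModEq MODC
      ((pvIdx.map (fun t => pvG2 (S.foldl (pvStepA n minValue) G) n t)).sum)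
      ((pvIdx.map (fun m => (pvIdx.map (fun t =>
          pvG2 G m t * pvG2 (pvT n minValue S) m t)).sum)).sum) := by
  intro S
  induction S with
  | nil =>
    intro G _ hlen hrows
    rw [List.foldl_nil]
    have hbase : (pvIdx.map (fun m => (pvIdx.map (fun t =>
        pvG2 G m t * pvG2 (pvT n minValue []) m t)).sum)).sum
        = (pvIdx.map (fun m => if m = n then (pvIdx.map (fun t => pvG2 G n t)).sum else 0)).sum := by
      apply congrArg
      apply List.map_congr_left
      intro m hm
      obtain ⟨hm0, hm1⟩ := pvIdx_bounds m hm
      by_cases he : m = n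
      · rw [if_pos he]
        apply congrArg
        apply List.map_congr_left
        intro t ht
        obtain ⟨ht0, ht1⟩ := pvIdx_bounds t ht
        show pvG2 G m t * pvG2 (pvBase n) m t = pvG2 G n t
        rw [pvBase_g2 n m t hm0 hm1 ht0 ht1, if_pos he, mul_one, he]
      · rw [if_neg he]
        have : pvIdx.map (fun t => pvG2 G m t * pvG2 (pvT n minValue []) m t)
            = pvIdx.map (fun _ => (0:Int)) := by
          apply List.map_congr_left
          intro t ht
          obtain ⟨ht0, ht1⟩ := pvIdx_bounds t ht
          show pvG2 G m t * pvG2 (pvBase n) m t = 0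
          rw [pvBase_g2 n m t hm0 hm1 ht0 ht1, if_neg he, mul_zero]
        rw [this, pvSum_zeros]
    rw [hbase, pvSum_pick pvIdx pvIdx_nodup n (pvIdx_mem n hn0 hn) _]
  | cons gv S' ih =>
    intro G hmem hlen hrows
    obtain ⟨hg, hv⟩ := hmem gv List.mem_cons_self
    obtain ⟨A1, A2, _⟩ := pvOuter_char gv.2 gv.1 n minValue hv hg hn hmv G
      (n - (gv.1 - 1)).toNat n G rfl le_rfl hlen hrows (fun _ _ _ _ _ => rfl)
    rw [List.foldl_cons]
    have hih := ih (pvStepA n minValue G gv)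
      (fun q hq => hmem q (List.mem_cons_of_mem _ hq)) A1 A2
    refine hih.trans ?_
    -- now exchange one item between the prefix table and the suffix table
    set T2 : List (List Int) := pvT n minValue S' with hT2
    have hstepT : pvT n minValue (gv :: S') = pvBStep n minValue T2 gv := rfl
    -- left side ≡ Σ (G + Aadd)·T2
    have hgv : gv = (gv.1, gv.2) := rfl
    have hleft : Int.ModEq MODC
        ((pvIdx.map (fun m => (pvIdx.map (fun t =>
            pvG2 (pvStepA n minValue G gv) m t * pvG2 T2 m t)).sum)).sum)
        ((pvIdx.map (fun m => (pvIdx.map (fun t =>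
            (pvG2 G m t + (if gv.1 ≤ m ∧ m ≤ n then
              pvSrcSum (fun j => pvG2 G (m - gv.1) j) gv.2 minValue t else 0)) * pvG2 T2 m t)).sum)).sum) := by
      apply pvSum_modEq
      intro m hm
      obtain ⟨hm0, _⟩ := pvIdx_bounds m hm
      apply pvSum_modEq
      intro t ht
      obtain ⟨ht0, _⟩ := pvIdx_bounds t ht
      have := pvStepA_modEq n minValue gv.1 gv.2 hg hv hn hmv G hlen hrows m t hm0 ht0
      rw [← hgv] at this
      exact this.mul_right _
    -- right side ≡ Σ G·(T2 + Badd)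
    have hright : Int.ModEq MODC
        ((pvIdx.map (fun m => (pvIdx.map (fun t =>
            pvG2 G m t * pvG2 (pvBStep n minValue T2 gv) m t)).sum)).sum)
        ((pvIdx.map (fun m => (pvIdx.map (fun t =>
            pvG2 G m t * (pvG2 T2 m t + (if t ≤ minValue ∧ m + gv.1 ≤ n then
              pvG2 T2 (m + gv.1) (min 100 (t + gv.2)) else 0)))).sum)).sum) := by
      apply pvSum_modEq
      intro m hm
      obtain ⟨hm0, hm1⟩ := pvIdx_bounds m hm
      apply pvSum_modEq
      intro t ht
      obtain ⟨ht0, ht1⟩ := pvIdx_bounds t ht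
      rw [pvBStep_g2 n minValue T2 gv m t hm0 hm1 ht0 ht1]
      exact (pvModEq_mod _).mul_left _
    -- distribute and use the exchange identity
    have hdist :
        (pvIdx.map (fun m => (pvIdx.map (fun t =>
            (pvG2 G m t + (if gv.1 ≤ m ∧ m ≤ n then
              pvSrcSum (fun j => pvG2 G (m - gv.1) j) gv.2 minValue t else 0)) * pvG2 T2 m t)).sum)).sum
        = (pvIdx.map (fun m => (pvIdx.map (fun t =>
            pvG2 G m t * (pvG2 T2 m t + (if t ≤ minValue ∧ m + gv.1 ≤ n then
              pvG2 T2 (m + gv.1) (min 100 (t + gv.2)) else 0)))).sum)).sum := by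
      have e1 : ∀ m ∈ pvIdx, (pvIdx.map (fun t =>
            (pvG2 G m t + (if gv.1 ≤ m ∧ m ≤ n then
              pvSrcSum (fun j => pvG2 G (m - gv.1) j) gv.2 minValue t else 0)) * pvG2 T2 m t)).sum
          = (pvIdx.map (fun t => pvG2 G m t * pvG2 T2 m t)).sum +
            (pvIdx.map (fun t => (if gv.1 ≤ m ∧ m ≤ n then
              pvSrcSum (fun j => pvG2 G (m - gv.1) j) gv.2 minValue t else 0) * pvG2 T2 m t)).sum := by
        intro m _
        rw [← pvSum_add]
        apply congrArg
        apply List.map_congr_left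
        intro t _
        ring
      have e2 : ∀ m ∈ pvIdx, (pvIdx.map (fun t =>
            pvG2 G m t * (pvG2 T2 m t + (if t ≤ minValue ∧ m + gv.1 ≤ n then
              pvG2 T2 (m + gv.1) (min 100 (t + gv.2)) else 0)))).sum
          = (pvIdx.map (fun t => pvG2 G m t * pvG2 T2 m t)).sum +
            (pvIdx.map (fun t => pvG2 G m t * (if t ≤ minValue ∧ m + gv.1 ≤ n then
              pvG2 T2 (m + gv.1) (min 100 (t + gv.2)) else 0))).sum := by
        intro m _
        rw [← pvSum_add]
        apply congrArg
        apply List.map_congr_left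
        intro t _
        ring
      rw [List.map_congr_left e1, List.map_congr_left e2, pvSum_add, pvSum_add]
      rw [pvExchange n minValue gv.1 gv.2 hg hv hn0 hn hmv G T2]
    rw [hstepT]
    exact hleft.trans (hdist ▸ hright.symm)

-- row sum of a well-shaped table as a sum over pvIdx
lemma pvRowSum (D : List (List Int)) (hl : D.length = 101) (hr : ∀ r ∈ D, r.length = 101)
    (i : Int) (h0 : 0 ≤ i) (h1 : i ≤ 100) :
    (PySem.List.pyGetD D i []).sum = (pvIdx.map (fun t => pvG2 D i t)).sum := by
  set row : List Int := PySem.List.pyGetD D i [] with hrow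
  have hrmem : row ∈ D := by
    rw [hrow, PySem.List.pyGetD_eq_getElem D [] h0 (by rw [hl]; exact_mod_cast (by omega : i < (101:Int)))]
    exact List.getElem_mem _
  have hrlen : row.length = 101 := hr row hrmem
  conv_lhs => rw [← PySem.List.map_pyGetD_pyRange_zero row 0]
  rw [PySem.List.len_eq, hrlen]
  rfl

-- A's initial table pointwise
lemma pvInitA_g2 (m t : Int) (hm0 : 0 ≤ m) (hm1 : m ≤ 100) (ht0 : 0 ≤ t) (ht1 : t ≤ 100) :
    pvG2 pvInitA m t = if m = 0 ∧ t = 0 then 1 else 0 := by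
  have hzrow : ∀ u : Int, 0 ≤ u → u ≤ 100 →
      PySem.List.pyGetD ((PySem.List.pyRange 0 101 1).map (fun _ => (0:Int))) u 0 = 0 := by
    intro u h0 h1
    rw [PySem.List.pyGetD_map_pyRange_of_nonneg _ _ _ _ h0 (by omega)]
  have hzlen : ((PySem.List.pyRange 0 101 1).map (fun _ => (0:Int))).length = 101 := by
    rw [List.length_map, PySem.List.length_pyRange_one]; rfl
  have hbase : ∀ i : Int, 0 ≤ i → i ≤ 100 →
      PySem.List.pyGetD
        ((PySem.List.pyRange 0 101 1).map (fun _ => (PySem.List.pyRange 0 101 1).map (fun _ => (0:Int)))) i []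
        = (PySem.List.pyRange 0 101 1).map (fun _ => (0:Int)) := by
    intro i h0 h1
    rw [PySem.List.pyGetD_map_pyRange_of_nonneg _ _ _ _ h0 (by omega)]
  have hbaselen : ((PySem.List.pyRange 0 101 1).map (fun _ => (PySem.List.pyRange 0 101 1).map (fun _ => (0:Int)))).length = 101 := by
    rw [List.length_map, PySem.List.length_pyRange_one]; rfl
  by_cases hi : m = 0
  · subst hi
    rw [pvG2, pvInitA, pyGetD_pySetD_eq _ _ _ _ le_rfl (by rw [hbaselen]; exact_mod_cast (by omega : (0:Int) < 101)),
        hbase 0 le_rfl (by omega)]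
    by_cases ht : t = 0
    · subst ht
      rw [pyGetD_pySetD_eq _ _ _ _ le_rfl (by rw [hzlen]; exact_mod_cast (by omega : (0:Int) < 101))]
      simp
    · rw [pyGetD_pySetD_ne _ _ _ _ _ le_rfl ht0 ht, hzrow t ht0 ht1, if_neg (by omega)]
  · rw [pvG2, pvInitA, pyGetD_pySetD_ne _ _ _ _ _ le_rfl hm0 hi, hbase m hm0 hm1, hzrow t ht0 ht1,
        if_neg (by omega)]

lemma pvInitA_shape : pvInitA.length = 101 ∧ ∀ r ∈ pvInitA, r.length = 101 := by
  have hzlen : ((PySem.List.pyRange 0 101 1).map (fun _ => (0:Int))).length = 101 := by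
    rw [List.length_map, PySem.List.length_pyRange_one]; rfl
  have hbase : PySem.List.pyGetD
        ((PySem.List.pyRange 0 101 1).map (fun _ => (PySem.List.pyRange 0 101 1).map (fun _ => (0:Int)))) 0 []
        = (PySem.List.pyRange 0 101 1).map (fun _ => (0:Int)) := by
    rw [PySem.List.pyGetD_map_pyRange_of_nonneg _ _ _ _ le_rfl (by omega)]
  constructor
  · rw [pvInitA, PySem.List.length_pySetD, List.length_map, PySem.List.length_pyRange_one]; rfl
  · intro r hr
    rw [pvInitA, PySem.List.pySetD_of_nonneg _ _ le_rfl] at hr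
    rcases List.mem_or_eq_of_mem_set hr with h | rfl
    · rcases List.mem_map.mp h with ⟨_, _, rfl⟩
      exact hzlen
    · rw [hbase, PySem.List.length_pySetD]
      exact hzlen

-- negative row reads of A's initial table
lemma pvNegRow (n : Int) (hn0 : -100 ≤ n) (hn1 : n ≤ -1) :
    PySem.List.pyGetD pvInitA n [] = (PySem.List.pyRange 0 101 1).map (fun _ => (0:Int)) := by
  have hlen : ∀ r : List Int, (PySem.List.pySetD
      ((PySem.List.pyRange 0 101 1).map (fun _ => (PySem.List.pyRange 0 101 1).map (fun _ => (0:Int))))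
      0 r).length = 101 := by
    intro r
    rw [PySem.List.length_pySetD, List.length_map, PySem.List.length_pyRange_one]; rfl
  rw [pvInitA, PySem.List.pyGetD, PySem.List.pyGet?, hlen]
  have hidx : PySem.List.pyIdx? 101 n = some (101 - (-n).toNat) := by
    rw [PySem.List.pyIdx?, if_neg (by omega), if_pos (by omega)]
  rw [hidx, Option.bind_some]
  rw [PySem.List.pySetD_of_nonneg _ _ le_rfl]
  rw [List.getElem?_set_ne (by omega)]
  rw [List.getElem?_map]
  have : (PySem.List.pyRange 0 101 1)[101 - (-n).toNat]? = some ((0:Int) + (101 - (-n).toNat)) := by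
    rw [PySem.List.getElem?_pyRange_one, if_pos (by omega)]
    congr 1
    omega
  rw [this]
  rfl

set_option maxRecDepth 4096 in
lemma pvZrowSum : ((PySem.List.pyRange 0 101 1).map (fun _ => (0:Int))).sum = 0 := by
  decide

-- A's item loop does nothing when every group size exceeds n
lemma pvInertA (n minValue : Int) :
    ∀ (L : List (Int × Int)) (G : List (List Int)), (∀ gv ∈ L, n < gv.1) →
    L.foldl (pvStepA n minValue) G = G := by
  intro L
  induction L with
  | nil => intro G _; rfl
  | cons gv rest ih =>
    intro G hmem
    rw [List.foldl_cons, pvStepA, PySem.List.pyRange_neg_one_eq_nil (a := n) (b := gv.1 - 1) (by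
      have := hmem gv List.mem_cons_self; omega), List.foldl_nil]
    exact ih G (fun q hq => hmem q (List.mem_cons_of_mem _ hq))

-- the row-n sum of A's initial table
lemma pvInitRowSum (n : Int) (hn0 : 0 ≤ n) (hn1 : n ≤ 100) :
    (PySem.List.pyGetD pvInitA n []).sum = if n = 0 then 1 else 0 := by
  obtain ⟨hl, hr⟩ := pvInitA_shape
  rw [pvRowSum pvInitA hl hr n hn0 hn1]
  have : pvIdx.map (fun t => pvG2 pvInitA n t)
      = pvIdx.map (fun t => if t = 0 then (if n = 0 then 1 else 0) else 0) := by
    apply List.map_congr_left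
    intro t ht
    obtain ⟨ht0, ht1⟩ := pvIdx_bounds t ht
    rw [pvInitA_g2 n t hn0 hn1 ht0 ht1]
    by_cases h1 : t = 0
    · subst h1
      by_cases h2 : n = 0
      · simp [h2]
      · simp [h2]
    · simp [h1]
  rw [this, pvSum_pick pvIdx pvIdx_nodup 0 (pvIdx_mem 0 (by omega) (by omega))]

-- the two ports in closed fold form
lemma pvA_eq (n minValue : Int) (group value : List Int) :
    crypticCiphers n minValue group value =
      PySem.Int.mod (PySem.List.pyGetD
        ((PySem.List.sorted2 (group.zip value) (fun p => p.1) (fun p => p.2)).foldl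
          (pvStepA n minValue) pvInitA) n []).sum MODC := rfl

lemma pvB_eq (n minValue : Int) (group value : List Int) :
    crypticCiphers_alt n minValue group value =
      PySem.Int.mod (pvG2 (pvT n minValue
        (PySem.List.sorted2 (group.zip value) (fun p => p.1) (fun p => p.2))) 0 0) MODC := by
  rw [crypticCiphers_alt]
  show PySem.Int.mod (pvG2 ((PySem.List.sorted2 (group.zip value) (fun p => p.1) (fun p => p.2)).reverse.foldl
      (pvBStep n minValue) (pvBase n)) 0 0) MODC = _
  rw [List.foldl_reverse]
  rfl

-- the main statement over an arbitrary item list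
lemma pvMain (n minValue : Int) (L : List (Int × Int))
    (hgrpL : ∀ gv ∈ L, 0 ≤ gv.1) (hnlo : -100 ≤ n) (hnhi : n ≤ 100)
    (hd : n < 0 ∨ (minValue ≤ 100 ∧ ∀ gv ∈ L, 0 ≤ gv.2) ∨ (∀ gv ∈ L, n < gv.1)) :
    PySem.Int.mod (PySem.List.pyGetD (L.foldl (pvStepA n minValue) pvInitA) n []).sum MODC
      = PySem.Int.mod (pvG2 (pvT n minValue L) 0 0) MODC := by
  by_cases hneg : n < 0
  · -- both sides are 0: A's loops never run and read a zero wrap row; B can never take an item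
    have hgt : ∀ gv ∈ L, n < gv.1 := fun gv hgv => lt_of_lt_of_le hneg (hgrpL gv hgv)
    rw [pvInertA n minValue L _ hgt, pvNegRow n (by omega) (by omega), pvZrowSum]
    rw [pvBConst n minValue L (fun gv hgv m hm0 h => by
          have := hgrpL gv hgv; omega) 0 0 le_rfl (by omega) le_rfl (by omega),
        if_neg (by omega)]
  · have hn0 : 0 ≤ n := by omega
    rcases hd with h | h | h
    · omega
    · -- the knapsack case: the convolution invariant
      obtain ⟨hl, hr⟩ := pvInitA_shape
      have hmemL : ∀ gv ∈ L, 0 ≤ gv.1 ∧ 0 ≤ gv.2 := fun gv hgv => ⟨hgrpL gv hgv, h.2 gv hgv⟩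
      have hconv := pvConv n minValue hn0 hnhi h.1 L pvInitA hmemL hl hr
      obtain ⟨fl, fr⟩ := pvFoldA_shape n minValue hnhi h.1 L pvInitA hmemL hl hr
      rw [pvRowSum _ fl fr n hn0 hnhi]
      apply pvModEq_result
      refine hconv.trans ?_
      have : (pvIdx.map (fun m => (pvIdx.map (fun t =>
          pvG2 pvInitA m t * pvG2 (pvT n minValue L) m t)).sum)).sum
          = pvG2 (pvT n minValue L) 0 0 := by
        have e1 : pvIdx.map (fun m => (pvIdx.map (fun t =>
            pvG2 pvInitA m t * pvG2 (pvT n minValue L) m t)).sum)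
            = pvIdx.map (fun m => if m = 0 then pvG2 (pvT n minValue L) 0 0 else 0) := by
          apply List.map_congr_left
          intro m hm
          obtain ⟨hm0, hm1⟩ := pvIdx_bounds m hm
          by_cases he : m = 0
          · subst he
            rw [if_pos rfl]
            have : pvIdx.map (fun t => pvG2 pvInitA 0 t * pvG2 (pvT n minValue L) 0 t)
                = pvIdx.map (fun t => if t = 0 then pvG2 (pvT n minValue L) 0 0 else 0) := by
              apply List.map_congr_left
              intro t ht
              obtain ⟨ht0, ht1⟩ := pvIdx_bounds t ht
              rw [pvInitA_g2 0 t le_rfl (by omega) ht0 ht1]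
              by_cases h2 : t = 0
              · subst h2; simp
              · simp [h2]
            rw [this, pvSum_pick pvIdx pvIdx_nodup 0 (pvIdx_mem 0 le_rfl (by omega))]
          · rw [if_neg he]
            have : pvIdx.map (fun t => pvG2 pvInitA m t * pvG2 (pvT n minValue L) m t)
                = pvIdx.map (fun _ => (0:Int)) := by
              apply List.map_congr_left
              intro t ht
              obtain ⟨ht0, ht1⟩ := pvIdx_bounds t ht
              rw [pvInitA_g2 m t hm0 hm1 ht0 ht1, if_neg (fun hh => he hh.1), zero_mul]
            rw [this, pvSum_zeros]
        rw [e1, pvSum_pick pvIdx pvIdx_nodup 0 (pvIdx_mem 0 le_rfl (by omega))]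
      rw [this]
    · -- every group size exceeds n: both sides reduce to [n = 0]
      rw [pvInertA n minValue L _ h, pvInitRowSum n hn0 hnhi]
      rw [pvBConst n minValue L (fun gv hgv m hm0 hle => by
            have := h gv hgv; omega) 0 0 le_rfl (by omega) le_rfl (by omega)]
      by_cases he : n = 0
      · rw [if_pos he, if_pos he.symm]
      · rw [if_neg he, if_neg (fun e => he e.symm)]

-- ===== VERDICT (by name: the statement is the Claim_ definition above) =====
theorem crypticCiphers_spec : Claim_equal_crypticCiphers := by
  intro n minValue group value _hdom hpre
  obtain ⟨hgrp, hnlo, hnhi, hd⟩ := hpre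
  have hLmem : ∀ gv ∈ PySem.List.sorted2 (group.zip value) (fun p => p.1) (fun p => p.2),
      gv.1 ∈ group ∧ gv.2 ∈ value := by
    intro gv hgv
    exact List.of_mem_zip
      ((PySem.List.sorted2_perm (group.zip value) (fun p => p.1) (fun p => p.2) false).mem_iff.mp hgv)
  rw [Spec_crypticCiphers, pvA_eq, pvB_eq]
  have hd' : n < 0 ∨ (minValue ≤ 100 ∧
      ∀ gv ∈ PySem.List.sorted2 (group.zip value) (fun p => p.1) (fun p => p.2), 0 ≤ gv.2) ∨
      (∀ gv ∈ PySem.List.sorted2 (group.zip value) (fun p => p.1) (fun p => p.2), n < gv.1) := by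
    rcases hd with h | h | h
    · exact Or.inl h
    · exact Or.inr (Or.inl ⟨h.1, fun gv hgv => h.2 _ (hLmem gv hgv).2⟩)
    · exact Or.inr (Or.inr (fun gv hgv => h _ (hLmem gv hgv).1))
  exact pvMain n minValue (PySem.List.sorted2 (group.zip value) (fun p => p.1) (fun p => p.2))
    (fun gv hgv => hgrp _ (hLmem gv hgv).1) hnlo hnhi hd'
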